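-- pv_equiv track=rewrite | github.com/C2SM/zonda-request | src/processing/process_request.py | create_nesting_groups
-- ===== SOURCE A (Python) =====
-- def create_nesting_groups(config, grid_sources):
--     domains_config = config["domains"]
--
--     nesting_groups = []
--
--     for domain_config in domains_config:
--         domain_id = domain_config["domain_id"]
--         domain_idx = domain_id - 1
--
--         # ATTENTION:
--         # The condition below should be added to the if only if more valid grid sources are added, but for now
--         # let's assume "input_grid" and "icontools" are the only possible ones.
--         # ... and ((grid_sources[domain_idx-1] == "input_grid") or (grid_sources[domain_idx-1] == "icontools")):
--         if (len(nesting_groups) > 0) and (grid_sources[domain_idx] == "icontools"):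
--             nesting_groups[-1].append(domain_id)
--         else:
--             nesting_groups.append([domain_id])
--
--     return nesting_groups
-- ===== SOURCE B (Python) =====
-- def create_nesting_groups(config, grid_sources):
--     domain_ids = [dc["domain_id"] for dc in config["domains"]]
--     n = len(domain_ids)
--     groups = []
--     i = 0
--     while i < n:
--         # find the end of the run of icontools domains that nest under domain i
--         j = i + 1
--         while j < n and grid_sources[domain_ids[j] - 1] == "icontools":
--             j += 1
--         groups.append(domain_ids[i:j])
--         i = j
--     return groups
-- ===== Notes on version B (the rewrite author's own statement) =====
-- stated objective: alternative
-- what changed: Replaces A's decide-per-element pass that appends to the last group with a two-level index scan: extract domain_ids once, then find each maximal run of icontools domains with an inner pointer and emit it as one slice.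
import Mathlib
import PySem

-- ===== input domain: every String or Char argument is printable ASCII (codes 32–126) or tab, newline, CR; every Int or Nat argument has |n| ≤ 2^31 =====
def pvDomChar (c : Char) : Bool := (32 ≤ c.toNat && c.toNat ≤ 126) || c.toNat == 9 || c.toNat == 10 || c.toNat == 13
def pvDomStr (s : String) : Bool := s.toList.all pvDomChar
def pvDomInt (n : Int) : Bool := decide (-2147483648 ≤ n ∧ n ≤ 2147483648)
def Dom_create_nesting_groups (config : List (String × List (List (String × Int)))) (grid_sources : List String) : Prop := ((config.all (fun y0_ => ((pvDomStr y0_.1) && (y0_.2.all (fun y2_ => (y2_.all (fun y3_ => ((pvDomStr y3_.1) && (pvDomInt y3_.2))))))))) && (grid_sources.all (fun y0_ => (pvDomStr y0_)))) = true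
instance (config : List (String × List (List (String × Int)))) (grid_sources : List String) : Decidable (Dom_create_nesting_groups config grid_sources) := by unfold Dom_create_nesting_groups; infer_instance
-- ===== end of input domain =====

-- B replaces A's decide-per-element pass (append to the last group or start a new one)
-- with a two-level index scan: extract domain_ids once, then locate each maximal run of
-- icontools domains with an inner pointer and emit it as one slice. Same cost; alternative
-- decomposition.

-- ===== PORT A =====
def create_nesting_groups (config : List (String × List (List (String × Int)))) (grid_sources : List String) : List (List Int) :=
  let domains_config := (PySem.Dict.get? (PySem.Dict.mk config) "domains").getD []
  domains_config.foldl (fun nesting_groups domain_config =>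
    let domain_id := (PySem.Dict.get? (PySem.Dict.mk domain_config) "domain_id").getD 0
    let domain_idx := domain_id - 1
    if 0 < nesting_groups.length ∧ (PySem.List.pyGet? grid_sources domain_idx).getD "" = "icontools" then
      nesting_groups.dropLast ++ [(nesting_groups.getLast?.getD []) ++ [domain_id]]
    else
      nesting_groups ++ [[domain_id]]) []

-- ===== PORT B =====
-- inner while loop: advance j over the run of icontools domains
def pvRunEnd (grid_sources : List String) (ids : List Int) (n j : Nat) : Nat :=
  if _h : j < n ∧ (PySem.List.pyGet? grid_sources ((ids.getD j 0) - 1)).getD "" = "icontools" then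
    pvRunEnd grid_sources ids n (j + 1)
  else j
termination_by n - j
decreasing_by omega

theorem pvRunEnd_ge (gs : List String) (ids : List Int) (n j : Nat) :
    j ≤ pvRunEnd gs ids n j := by
  fun_induction pvRunEnd <;> omega

-- outer while loop: emit the slice domain_ids[i:j] for each run
def pvGroupsLoop (grid_sources : List String) (ids : List Int) (n i : Nat) (groups : List (List Int)) : List (List Int) :=
  if _h : i < n then
    let j := pvRunEnd grid_sources ids n (i + 1)
    pvGroupsLoop grid_sources ids n j (groups ++ [PySem.List.slice ids (some (i : Int)) (some (j : Int))])
  else groups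
termination_by n - i
decreasing_by
  have : i + 1 ≤ pvRunEnd grid_sources ids n (i + 1) := pvRunEnd_ge grid_sources ids n (i + 1)
  omega

def create_nesting_groups_alt (config : List (String × List (List (String × Int)))) (grid_sources : List String) : List (List Int) :=
  let domain_ids := ((PySem.Dict.get? (PySem.Dict.mk config) "domains").getD []).map
    (fun dc => (PySem.Dict.get? (PySem.Dict.mk dc) "domain_id").getD 0)
  pvGroupsLoop grid_sources domain_ids domain_ids.length 0 []

-- ===== PRECONDITION & SPEC =====
-- A raises KeyError without a "domains" key / a "domain_id" key, and IndexError when a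
-- non-first domain's (domain_id - 1) is out of range for grid_sources (Python negative
-- indexing allowed); Pre_ excludes exactly those inputs.
def Pre_create_nesting_groups (config : List (String × List (List (String × Int)))) (grid_sources : List String) : Prop :=
  (PySem.Dict.get? (PySem.Dict.mk config) "domains").isSome = true ∧
  (∀ dc ∈ (PySem.Dict.get? (PySem.Dict.mk config) "domains").getD [],
      (PySem.Dict.get? (PySem.Dict.mk dc) "domain_id").isSome = true) ∧
  (∀ x ∈ (((PySem.Dict.get? (PySem.Dict.mk config) "domains").getD []).map
      (fun dc => (PySem.Dict.get? (PySem.Dict.mk dc) "domain_id").getD 0)).drop 1,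
      (PySem.List.pyGet? grid_sources (x - 1)).isSome = true)
instance (config : List (String × List (List (String × Int)))) (grid_sources : List String) : Decidable (Pre_create_nesting_groups config grid_sources) := by unfold Pre_create_nesting_groups; infer_instance

def pvWitness_create_nesting_groups : (List (String × List (List (String × Int)))) × List String :=
  ([("domains", [[("domain_id", 1)], [("domain_id", 2)], [("domain_id", 3)]])], ["input_grid", "icontools", "input_grid"])

def Spec_create_nesting_groups (config : List (String × List (List (String × Int)))) (grid_sources : List String) (out : List (List Int)) : Prop := out = create_nesting_groups_alt config grid_sources
instance (config : List (String × List (List (String × Int)))) (grid_sources : List String) (out : List (List Int)) : Decidable (Spec_create_nesting_groups config grid_sources out) := by unfold Spec_create_nesting_groups; infer_instance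

-- ===== CLAIM (what is proved, stated in full; the proofs are below) =====
def Claim_equal_create_nesting_groups : Prop := ∀ (config : List (String × List (List (String × Int)))) (grid_sources : List String), Dom_create_nesting_groups config grid_sources → Pre_create_nesting_groups config grid_sources → Spec_create_nesting_groups config grid_sources (create_nesting_groups config grid_sources)

-- ===== LEMMAS AND PROOFS =====

-- the "this domain nests (joins the current group)" test, shared spec predicate
def pvPb (gs : List String) (x : Int) : Bool :=
  decide ((PySem.List.pyGet? gs (x - 1)).getD "" = "icontools")

-- reference grouping: head starts a group, the following run of nesting domains joins it
def pvGroups (gs : List String) : List Int → List (List Int)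
  | [] => []
  | d :: rest => (d :: rest.takeWhile (pvPb gs)) :: pvGroups gs (rest.dropWhile (pvPb gs))
termination_by l => l.length
decreasing_by simpa using Nat.lt_succ_of_le (List.length_dropWhile_le (pvPb gs) rest)

theorem pvTakeDrop (p : Int → Bool) (l : List Int) :
    l.take (l.takeWhile p).length = l.takeWhile p ∧ l.drop (l.takeWhile p).length = l.dropWhile p := by
  induction l with
  | nil => simp
  | cons x xs ih =>
    by_cases hp : p x
    · simp [hp, ih.1, ih.2]
    · simp [hp]

theorem pvRunEnd_eq (gs : List String) (ids : List Int) :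
    ∀ k j, ids.length - j ≤ k →
      pvRunEnd gs ids ids.length j = j + ((ids.drop j).takeWhile (pvPb gs)).length := by
  intro k
  induction k with
  | zero =>
    intro j hk
    have hge : ids.length ≤ j := by omega
    rw [pvRunEnd, dif_neg (by omega)]
    simp [List.drop_eq_nil_of_le hge]
  | succ k ih =>
    intro j hk
    rw [pvRunEnd]
    by_cases h : j < ids.length ∧ (PySem.List.pyGet? gs ((ids.getD j 0) - 1)).getD "" = "icontools"
    · rw [dif_pos h, ih (j + 1) (by omega)]
      obtain ⟨hlt, hc⟩ := h
      have hp : pvPb gs ids[j] = true := by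
        unfold pvPb
        rw [List.getD_eq_getElem ids 0 hlt] at hc
        exact decide_eq_true hc
      rw [List.drop_eq_getElem_cons hlt, List.takeWhile_cons, hp]
      simp; omega
    · rw [dif_neg h]
      rcases Nat.lt_or_ge j ids.length with hlt | hge
      · have hc : ¬ (PySem.List.pyGet? gs (ids[j] - 1)).getD "" = "icontools" := by
          intro hc; exact h ⟨hlt, by rw [List.getD_eq_getElem ids 0 hlt]; exact hc⟩
        have hp : pvPb gs ids[j] = false := by
          unfold pvPb; exact decide_eq_false hc
        rw [List.drop_eq_getElem_cons hlt, List.takeWhile_cons, hp]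
        simp
      · simp [List.drop_eq_nil_of_le hge]

theorem pvGroupsLoop_eq (gs : List String) (ids : List Int) :
    ∀ k i acc, ids.length - i ≤ k →
      pvGroupsLoop gs ids ids.length i acc = acc ++ pvGroups gs (ids.drop i) := by
  intro k
  induction k with
  | zero =>
    intro i acc hk
    have hge : ids.length ≤ i := by omega
    rw [pvGroupsLoop, dif_neg (by omega)]
    simp [List.drop_eq_nil_of_le hge, pvGroups]
  | succ k ih =>
    intro i acc hk
    rw [pvGroupsLoop]
    by_cases h : i < ids.length
    · rw [dif_pos h]
      have hrun := pvRunEnd_eq gs ids (ids.length - (i + 1)) (i + 1) (le_refl _)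
      set t := ((ids.drop (i + 1)).takeWhile (pvPb gs)).length with ht
      have hge := pvRunEnd_ge gs ids ids.length (i + 1)
      have htlen : t ≤ (ids.drop (i + 1)).length := by
        rw [ht]; exact List.Sublist.length_le (List.takeWhile_sublist _)
      rw [ih (pvRunEnd gs ids ids.length (i + 1))
          (acc ++ [PySem.List.slice ids (some (i : Int)) (some ((pvRunEnd gs ids ids.length (i + 1)) : Int))])
          (by rw [hrun]; simp only [List.length_drop] at htlen ⊢; omega)]
      rw [hrun]
      have hslice : PySem.List.slice ids (some (i : Int)) (some ((i + 1 + t : Nat) : Int)) =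
          ids[i] :: (ids.drop (i + 1)).takeWhile (pvPb gs) := by
        rw [PySem.List.slice_natCast]
        have he : i + 1 + t - i = t + 1 := by omega
        rw [he, List.drop_eq_getElem_cons h, List.take_succ_cons]
        rw [(pvTakeDrop (pvPb gs) (ids.drop (i + 1))).1]
      have hdrop : ids.drop (i + 1 + t) = (ids.drop (i + 1)).dropWhile (pvPb gs) := by
        rw [← (pvTakeDrop (pvPb gs) (ids.drop (i + 1))).2, ← ht, List.drop_drop]
      rw [hslice, hdrop]
      conv_rhs => rw [List.drop_eq_getElem_cons h, pvGroups]
      simp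
    · rw [dif_neg h]
      simp [List.drop_eq_nil_of_le (by omega : ids.length ≤ i), pvGroups]

theorem pvFoldl_eq (gs : List String) :
    ∀ (ids : List Int) (ng : List (List Int)) (g : List Int),
      ids.foldl (fun nesting_groups d =>
        if 0 < nesting_groups.length ∧ (PySem.List.pyGet? gs (d - 1)).getD "" = "icontools" then
          nesting_groups.dropLast ++ [(nesting_groups.getLast?.getD []) ++ [d]]
        else nesting_groups ++ [[d]]) (ng ++ [g]) =
      (ng ++ [g ++ ids.takeWhile (pvPb gs)]) ++ pvGroups gs (ids.dropWhile (pvPb gs)) := by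
  intro ids
  induction ids with
  | nil => intro ng g; simp [pvGroups]
  | cons d rest ih =>
    intro ng g
    rw [List.foldl_cons]
    by_cases hp : (PySem.List.pyGet? gs (d - 1)).getD "" = "icontools"
    · rw [if_pos ⟨by simp, hp⟩]
      have h1 : (ng ++ [g]).dropLast = ng := List.dropLast_concat
      have h2 : (ng ++ [g]).getLast?.getD [] = g := by simp
      rw [h1, h2, ih ng (g ++ [d])]
      have hpb : pvPb gs d = true := decide_eq_true hp
      simp [hpb]
    · rw [if_neg (by intro hc; exact hp hc.2)]
      rw [show ng ++ [g] ++ [[d]] = (ng ++ [g]) ++ [[d]] from rfl, ih (ng ++ [g]) [d]]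
      have hpb : pvPb gs d = false := decide_eq_false hp
      rw [List.takeWhile_cons, List.dropWhile_cons]
      simp only [hpb, Bool.false_eq_true, if_false]
      rw [pvGroups]
      simp

theorem pvA_eq_groups (gs : List String) (ids : List Int) :
    ids.foldl (fun nesting_groups d =>
        if 0 < nesting_groups.length ∧ (PySem.List.pyGet? gs (d - 1)).getD "" = "icontools" then
          nesting_groups.dropLast ++ [(nesting_groups.getLast?.getD []) ++ [d]]
        else nesting_groups ++ [[d]]) [] = pvGroups gs ids := by
  cases ids with
  | nil => simp [pvGroups]
  | cons d rest =>
    rw [List.foldl_cons, if_neg (by simp)]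
    have h := pvFoldl_eq gs rest [] [d]
    simp only [List.nil_append] at h ⊢
    rw [h, pvGroups]
    simp

theorem pvB_eq_groups (gs : List String) (ids : List Int) :
    pvGroupsLoop gs ids ids.length 0 [] = pvGroups gs ids := by
  simpa using pvGroupsLoop_eq gs ids ids.length 0 [] (by omega)

-- ===== VERDICT (by name: the statement is the Claim_ definition above) =====
theorem create_nesting_groups_spec : Claim_equal_create_nesting_groups := by
  intro config gs _ _
  show create_nesting_groups config gs = create_nesting_groups_alt config gs
  unfold create_nesting_groups create_nesting_groups_alt
  rw [pvB_eq_groups, ← pvA_eq_groups, List.foldl_map]
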